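-- pv_equiv track=rewrite | github.com/nicolaspinelneo/adventofcode2024 | day21/test2.py | getAutCom2
-- ===== SOURCE A (Python) =====
-- import copy
--
-- direc={">":[1,0],
--        "<":[-1,0],
--        "v":[0,1],
--        "^":[0,-1]}
--
-- def getAutCom2(comb, curPos):
--     # if "{},{}".format(comb,curPos) in dicoAutCom2:
--     #     return dicoAutCom2["{},{}".format(comb,curPos)]
--     autorizedComb=[]
--     for c in comb:
--         curPosCheck=copy.copy(curPos)
--         forbidden=False
--         for d in c:
--             curPosCheck=[curPosCheck[0]+direc[d][0],curPosCheck[1]+direc[d][1]]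
--             if curPosCheck==[0,0]:
--                 #forbidden
--                 forbidden=True
--                 break
--         if not forbidden:
--             autorizedComb.append(c)
--     comb=copy.copy(autorizedComb)
--     return comb
-- ===== SOURCE B (Python) =====
-- direc={">":[1,0],
--        "<":[-1,0],
--        "v":[0,1],
--        "^":[0,-1]}
--
-- def safe(c, x, y):
--     # divide and conquer: a combo is safe iff its first half is safe and its
--     # second half is safe from the first half's endpoint, which is obtained in
--     # closed form from character counts instead of walking the moves.
--     if not c:
--         return True
--     if len(c) == 1:
--         dx, dy = direc[c]
--         return (x + dx, y + dy) != (0, 0)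
--     m = len(c) // 2
--     a, b = c[:m], c[m:]
--     if not safe(a, x, y):
--         return False
--     nx = x + a.count(">") - a.count("<")
--     ny = y + a.count("v") - a.count("^")
--     return safe(b, nx, ny)
--
-- def getAutCom2(comb, curPos):
--     return [c for c in comb if safe(c, curPos[0], curPos[1])]
-- ===== Notes on version B (the rewrite author's own statement) =====
-- stated objective: alternative
-- what changed: B decides each combo by divide and conquer: it splits the move string in half, checks the first half recursively and jumps to the second half's starting point in closed form via character counts, instead of A's stateful step-by-step walk with a break flag.
-- outside the precondition, e.g. on getAutCom2(['', ''], []): A returns ['', ''], B raises IndexError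
import Mathlib
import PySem

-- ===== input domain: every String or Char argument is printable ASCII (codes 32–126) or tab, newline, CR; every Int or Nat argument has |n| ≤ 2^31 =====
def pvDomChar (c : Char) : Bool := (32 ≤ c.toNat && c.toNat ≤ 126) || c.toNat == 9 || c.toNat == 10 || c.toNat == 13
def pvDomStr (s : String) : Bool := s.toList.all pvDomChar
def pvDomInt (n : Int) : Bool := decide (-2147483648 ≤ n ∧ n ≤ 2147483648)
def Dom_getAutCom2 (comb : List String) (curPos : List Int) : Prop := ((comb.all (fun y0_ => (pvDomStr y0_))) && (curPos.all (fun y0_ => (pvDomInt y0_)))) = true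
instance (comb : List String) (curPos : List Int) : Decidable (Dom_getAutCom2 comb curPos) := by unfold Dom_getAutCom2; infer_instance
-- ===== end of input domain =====

-- B replaces A's stateful step-by-step walk (break flag) by a divide-and-conquer check:
-- first half recursively, then the second half from an endpoint computed in closed form
-- from character counts; objective: alternative.

-- ===== PORT A =====
-- direc[d] : none = KeyError
def pvDirec (d : Char) : Option (Int × Int) :=
  if d = '>' then some (1, 0)
  else if d = '<' then some (-1, 0)
  else if d = 'v' then some (0, 1)
  else if d = '^' then some (0, -1) else none

-- A's inner 'for d in c' loop with the break; none = an exception (KeyError/IndexError)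
def pvInnerA (cur : List Int) (cs : List Char) : Option Bool :=
  match cs with
  | [] => some false
  | d :: rest =>
    match pvDirec d, PySem.List.pyGet? cur 0, PySem.List.pyGet? cur 1 with
    | some dd, some x, some y =>
      let nxt := [x + dd.1, y + dd.2]
      if nxt = [0, 0] then some true else pvInnerA nxt rest
    | _, _, _ => none

def getAutCom2 (comb : List String) (curPos : List Int) : List String :=
  comb.foldl (fun acc c =>
    match pvInnerA curPos c.toList with
    | some false => acc ++ [c]
    | _ => acc) []

-- ===== PORT B =====
-- B's own copy of direc (module constant); none = KeyError
def pvDirecB (d : Char) : Option (Int × Int) :=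
  if d = '>' then some (1, 0)
  else if d = '<' then some (-1, 0)
  else if d = 'v' then some (0, 1)
  else if d = '^' then some (0, -1) else none

-- Source B's 'safe': divide and conquer on the move string; Python's str.count of a
-- single character is ported as List.count on the char list (exact for 1-char needles).
-- none = KeyError on an unknown move character.
def pvSafeB (cs : List Char) (x y : Int) : Option Bool :=
  match cs with
  | [] => some true
  | [d] =>
    match pvDirecB d with
    | none => none
    | some dd => some (!decide ((x + dd.1, y + dd.2) = ((0 : Int), (0 : Int))))
  | d1 :: d2 :: rest =>
    let c := d1 :: d2 :: rest
    let m := (rest.length + 2) / 2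
    let a := c.take m
    let b := c.drop m
    match pvSafeB a x y with
    | none => none
    | some false => some false
    | some true =>
      pvSafeB b (x + a.count '>' - a.count '<') (y + a.count 'v' - a.count '^')
termination_by cs.length
decreasing_by all_goals simp [List.length_take, List.length_drop] <;> omega

def getAutCom2_alt (comb : List String) (curPos : List Int) : List String :=
  comb.filter (fun c =>
    match PySem.List.pyGet? curPos 0, PySem.List.pyGet? curPos 1 with
    | some x, some y =>
      match pvSafeB c.toList x y with
      | some b => b
      | none => false
    | _, _ => false)

-- ===== PRECONDITION & SPEC =====
-- Pre_ excludes inputs where either Python raises: a move character outside direc's keys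
-- (KeyError) or curPos shorter than 2 (IndexError in A on any nonempty combo, and in B
-- whenever comb is nonempty, since B reads curPos[0], curPos[1] per combo).
def Pre_getAutCom2 (comb : List String) (curPos : List Int) : Prop :=
  (comb.all (fun c => c.toList.all (fun d => (['>', '<', 'v', '^'] : List Char).contains d))) = true
  ∧ 2 ≤ curPos.length

instance (comb : List String) (curPos : List Int) : Decidable (Pre_getAutCom2 comb curPos) := by
  unfold Pre_getAutCom2; infer_instance

def pvWitness_getAutCom2 : List String × List Int := (["<"], [2, 3])

def Spec_getAutCom2 (comb : List String) (curPos : List Int) (out : List String) : Prop := out = getAutCom2_alt comb curPos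
instance (comb : List String) (curPos : List Int) (out : List String) : Decidable (Spec_getAutCom2 comb curPos out) := by unfold Spec_getAutCom2; infer_instance

-- ===== CLAIM (what is proved, stated in full; the proofs are below) =====
def Claim_equal_getAutCom2 : Prop := ∀ (comb : List String) (curPos : List Int), Dom_getAutCom2 comb curPos → Pre_getAutCom2 comb curPos → Spec_getAutCom2 comb curPos (getAutCom2 comb curPos)

-- ===== LEMMAS AND PROOFS =====

-- proof-side model of one move (valid chars only ever reach the default)
def pvDir (d : Char) : Int × Int := (pvDirec d).getD (0, 0)

-- the full trajectory (positions after each move), total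
def pvTraj (p : Int × Int) (cs : List Char) : List (Int × Int) :=
  match cs with
  | [] => []
  | d :: rest =>
    let q := (p.1 + (pvDir d).1, p.2 + (pvDir d).2)
    q :: pvTraj q rest

-- the endpoint of the walk, total
def pvEnd (p : Int × Int) (cs : List Char) : Int × Int :=
  cs.foldl (fun q d => (q.1 + (pvDir d).1, q.2 + (pvDir d).2)) p

theorem pvTraj_append (a b : List Char) (p : Int × Int) :
    pvTraj p (a ++ b) = pvTraj p a ++ pvTraj (pvEnd p a) b := by
  induction a generalizing p with
  | nil => simp [pvTraj, pvEnd]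
  | cons d rest ih => simp [pvTraj, pvEnd, List.foldl_cons, ih]

-- endpoint in closed form from character counts, for valid move strings
theorem pvEnd_counts (cs : List Char) (x y : Int)
    (hv : ∀ d ∈ cs, d ∈ ['>', '<', 'v', '^']) :
    pvEnd (x, y) cs =
      (x + cs.count '>' - cs.count '<', y + cs.count 'v' - cs.count '^') := by
  induction cs generalizing x y with
  | nil => simp [pvEnd]
  | cons d rest ih =>
    have hd : d ∈ ['>', '<', 'v', '^'] := hv d (by simp)
    have hstep : pvEnd (x, y) (d :: rest) =
        pvEnd (x + (pvDir d).1, y + (pvDir d).2) rest := rfl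
    rw [hstep, ih _ _ (fun e he => hv e (by simp [he]))]
    fin_cases hd <;>
      simp [pvDir, pvDirec, Prod.ext_iff] <;> omega

-- A's break loop decides exactly membership of (0,0) in the trajectory
theorem pvInner_eq_traj (cs : List Char) (p : Int × Int)
    (hv : ∀ d ∈ cs, d ∈ ['>', '<', 'v', '^']) :
    pvInnerA [p.1, p.2] cs = some ((pvTraj p cs).contains (0, 0)) := by
  induction cs generalizing p with
  | nil => simp [pvInnerA, pvTraj]
  | cons d rest ih =>
    have hd : d ∈ ['>', '<', 'v', '^'] := hv d (by simp)
    obtain ⟨dd, hdd⟩ : ∃ dd, pvDirec d = some dd := by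
      fin_cases hd <;> exact ⟨_, rfl⟩
    have hdir : pvDir d = dd := by simp [pvDir, hdd]
    have ih' := ih (p.1 + dd.1, p.2 + dd.2) (fun e he => hv e (by simp [he]))
    simp only [pvInnerA, hdd, PySem.List.pyGet?_zero_cons]
    rw [show PySem.List.pyGet? [p.1, p.2] 1 = some p.2 by
      simp [PySem.List.pyGet?, PySem.List.pyIdx?]]
    simp only [pvTraj, hdir, List.contains_cons]
    by_cases h0 : (p.1 + dd.1, p.2 + dd.2) = ((0 : Int), (0 : Int))
    · have h1 : p.1 + dd.1 = 0 := congrArg Prod.fst h0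
      have h2 : p.2 + dd.2 = 0 := congrArg Prod.snd h0
      simp [h1, h2]
    · have hne : ¬ ([p.1 + dd.1, p.2 + dd.2] : List Int) = [0, 0] := by
        intro h; simp at h; exact h0 (by rw [Prod.ext_iff]; exact ⟨h.1, h.2⟩)
      have hne' : ¬ ((0 : Int), (0 : Int)) = (p.1 + dd.1, p.2 + dd.2) := fun h => h0 h.symm
      simp only [if_neg hne, ih']
      simp [hne']

-- B's divide-and-conquer decides the same membership (negated)
theorem pvSafeB_eq_traj (cs : List Char) (x y : Int)
    (hv : ∀ d ∈ cs, d ∈ ['>', '<', 'v', '^']) :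
    pvSafeB cs x y = some (!(pvTraj (x, y) cs).contains (0, 0)) := by
  induction hn : cs.length using Nat.strong_induction_on generalizing cs x y with
  | _ n ih =>
  match cs, hn with
  | [], _ => simp [pvSafeB, pvTraj]
  | [d], _ =>
    have hd : d ∈ ['>', '<', 'v', '^'] := hv d (by simp)
    obtain ⟨dd, hdd⟩ : ∃ dd, pvDirecB d = some dd := by
      fin_cases hd <;> exact ⟨_, rfl⟩
    have hdir : pvDir d = dd := by
      simp [pvDir, show pvDirec d = some dd from hdd]
    simp [pvSafeB, hdd, pvTraj, hdir, Prod.ext_iff, eq_comm]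
  | d1 :: d2 :: rest, hn =>
    set c := d1 :: d2 :: rest with hc
    set m := (rest.length + 2) / 2 with hm
    have hmlt : m < c.length := by simp [hc, hm]; omega
    have hmpos : 1 ≤ m := by omega
    have hta : (c.take m).length < n := by
      rw [← hn]; simp [List.length_take]; omega
    have htb : (c.drop m).length < n := by
      rw [← hn]; simp [List.length_drop, hc]; omega
    have hva : ∀ d ∈ c.take m, d ∈ ['>', '<', 'v', '^'] :=
      fun d hd => hv d (List.take_subset m c hd)
    have hvb : ∀ d ∈ c.drop m, d ∈ ['>', '<', 'v', '^'] :=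
      fun d hd => hv d (List.drop_subset m c hd)
    have ha := ih _ hta (c.take m) x y hva rfl
    have hsplit := pvTraj_append (c.take m) (c.drop m) (x, y)
    rw [List.take_append_drop] at hsplit
    have hend := pvEnd_counts (c.take m) x y hva
    have hb := ih _ htb (c.drop m)
        (x + (c.take m).count '>' - (c.take m).count '<')
        (y + (c.take m).count 'v' - (c.take m).count '^') hvb rfl
    rw [hend] at hsplit
    rw [pvSafeB]
    simp only [← hc, ← hm]
    rw [ha, hsplit]
    cases hca : (pvTraj (x, y) (c.take m)).contains (0, 0) with
    | false =>
      have hmemA : ((0 : Int), (0 : Int)) ∉ pvTraj (x, y) (c.take m) := by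
        simpa using hca
      simp [hb, hmemA]
    | true =>
      have hmemA : ((0 : Int), (0 : Int)) ∈ pvTraj (x, y) (c.take m) := by
        simpa using hca
      simp [hmemA]

-- A's loop only reads curPos through its first two elements
theorem pvInner_start (curPos : List Int) (x y : Int)
    (hx : PySem.List.pyGet? curPos 0 = some x) (hy : PySem.List.pyGet? curPos 1 = some y)
    (cs : List Char) : pvInnerA curPos cs = pvInnerA [x, y] cs := by
  cases cs with
  | nil => rfl
  | cons d rest =>
    simp only [pvInnerA, hx, hy, PySem.List.pyGet?_zero_cons]
    rw [show PySem.List.pyGet? [x, y] 1 = some y by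
      simp [PySem.List.pyGet?, PySem.List.pyIdx?]]

-- A's conditional-append fold equals acc ++ B's filter
theorem pvFold_filter (curPos : List Int) (x y : Int)
    (hx : PySem.List.pyGet? curPos 0 = some x) (hy : PySem.List.pyGet? curPos 1 = some y)
    (comb : List String) (hv : ∀ c ∈ comb, ∀ d ∈ c.toList, d ∈ ['>', '<', 'v', '^']) :
    ∀ acc : List String,
      comb.foldl (fun acc c =>
        match pvInnerA curPos c.toList with
        | some false => acc ++ [c]
        | _ => acc) acc =
      acc ++ comb.filter (fun c =>
        match PySem.List.pyGet? curPos 0, PySem.List.pyGet? curPos 1 with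
        | some x, some y =>
          match pvSafeB c.toList x y with
          | some b => b
          | none => false
        | _, _ => false) := by
  induction comb with
  | nil => simp
  | cons c rest ih =>
    intro acc
    have hvc : ∀ d ∈ c.toList, d ∈ ['>', '<', 'v', '^'] := fun d hd => hv c (by simp) d hd
    have hA : pvInnerA curPos c.toList = some ((pvTraj (x, y) c.toList).contains (0, 0)) := by
      rw [pvInner_start curPos x y hx hy]
      exact pvInner_eq_traj c.toList (x, y) hvc
    have hB := pvSafeB_eq_traj c.toList x y hvc
    have ih' := ih (fun c hc => hv c (by simp [hc]))
    simp only [List.foldl_cons, List.filter_cons, hA, hx, hy, hB]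
    cases hb : (pvTraj (x, y) c.toList).contains (0, 0) with
    | false => rw [ih']; simp [hx, hy]
    | true => rw [ih']; simp [hx, hy]

-- ===== VERDICT (by name: the statement is the Claim_ definition above) =====
theorem getAutCom2_spec : Claim_equal_getAutCom2 := by
  intro comb curPos _ hpre
  obtain ⟨hvalid', hlen⟩ := hpre
  have hvalid : ∀ c ∈ comb, ∀ d ∈ c.toList, d ∈ ['>', '<', 'v', '^'] := by
    simpa using hvalid'
  unfold Spec_getAutCom2 getAutCom2 getAutCom2_alt
  obtain ⟨x, hx⟩ : ∃ x, PySem.List.pyGet? curPos 0 = some x := by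
    match curPos, hlen with
    | a :: b :: t, _ => exact ⟨a, PySem.List.pyGet?_zero_cons ..⟩
  obtain ⟨y, hy⟩ : ∃ y, PySem.List.pyGet? curPos 1 = some y := by
    match curPos, hlen with
    | a :: b :: t, _ => exact ⟨b, by simp [PySem.List.pyGet?, PySem.List.pyIdx?]⟩
  simpa using pvFold_filter curPos x y hx hy comb hvalid []
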